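-- pv_equiv track=rewrite | github.com/vijay-maripi/Malicious-URL-Detector | Feature_extraction.py | Check_IPaddress
-- ===== SOURCE A (Python) =====
-- def Check_IPaddress(tokens_words):
--     cnt = 0;
--     for ele in tokens_words:
--         if str(ele).isnumeric():
--             cnt += 1
--         else:
--             if cnt >= 4:
--                 return 1
--             else:
--                 cnt = 0;
--     if cnt >= 4:
--         return 1
--     return 0
-- ===== SOURCE B (Python) =====
-- def Check_IPaddress(tokens_words):
--     flags = [str(x).isnumeric() for x in tokens_words]
--     for a, b, c, d in zip(flags, flags[1:], flags[2:], flags[3:]):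
--         if a and b and c and d:
--             return 1
--     return 0
-- ===== Notes on version B (the rewrite author's own statement) =====
-- stated objective: alternative
-- what changed: Replaces the counter-with-reset-and-early-return loop by precomputing the numeric flag of every token once and scanning consecutive quadruples of flags (zip of four shifted lists) for an all-true window.
import Mathlib
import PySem

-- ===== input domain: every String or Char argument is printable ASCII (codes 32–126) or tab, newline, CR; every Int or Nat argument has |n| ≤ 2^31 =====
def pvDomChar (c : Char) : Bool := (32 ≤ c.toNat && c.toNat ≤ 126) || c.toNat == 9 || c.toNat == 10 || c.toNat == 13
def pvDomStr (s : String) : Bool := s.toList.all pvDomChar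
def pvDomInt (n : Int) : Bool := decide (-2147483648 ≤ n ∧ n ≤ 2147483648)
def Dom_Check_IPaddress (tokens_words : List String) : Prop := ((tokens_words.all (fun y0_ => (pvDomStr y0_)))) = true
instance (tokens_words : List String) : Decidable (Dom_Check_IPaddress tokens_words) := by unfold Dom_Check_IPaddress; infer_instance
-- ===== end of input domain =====

-- B changes the algorithm: one pass precomputing numeric flags, then a scan of
-- consecutive flag quadruples, instead of A's counter with reset and early return.
-- On the ASCII domain str.isnumeric() coincides with str.isdigit(); ported as
-- PySem.Str.strIsdigit (exact on the stated printable-ASCII domain).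

-- ===== PORT A =====
-- the for-loop of A with its early returns: state cnt, same branch order
def pvALoop (ts : List String) (cnt : Int) : Int :=
  match ts with
  | [] => if cnt ≥ 4 then 1 else 0
  | e :: rest =>
      if PySem.Str.strIsdigit e then pvALoop rest (cnt + 1)
      else if cnt ≥ 4 then 1 else pvALoop rest 0

def Check_IPaddress (tokens_words : List String) : Int :=
  pvALoop tokens_words 0

-- ===== PORT B =====
-- iterating zip(flags, flags[1:], flags[2:], flags[3:]) = iterating the
-- consecutive quadruples of flags, with Source B's early return
def pvBLoop (flags : List Bool) : Int :=
  match flags with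
  | a :: b :: c :: d :: rest =>
      if a && b && c && d then 1 else pvBLoop (b :: c :: d :: rest)
  | _ => 0

def Check_IPaddress_alt (tokens_words : List String) : Int :=
  pvBLoop (tokens_words.map (fun x => PySem.Str.strIsdigit x))

-- ===== PRECONDITION & SPEC =====
def Spec_Check_IPaddress (tokens_words : List String) (out : Int) : Prop := out = Check_IPaddress_alt tokens_words
instance (tokens_words : List String) (out : Int) : Decidable (Spec_Check_IPaddress tokens_words out) := by unfold Spec_Check_IPaddress; infer_instance

-- ===== CLAIM (what is proved, stated in full; the proofs are below) =====
def Claim_equal_Check_IPaddress : Prop := ∀ (tokens_words : List String), Dom_Check_IPaddress tokens_words → Spec_Check_IPaddress tokens_words (Check_IPaddress tokens_words)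

-- ===== LEMMAS AND PROOFS =====

-- "there are four consecutive numeric tokens" as a decomposition of the flag list
def pvW (f : List Bool) : Prop :=
  ∃ pre suf, f = pre ++ [true, true, true, true] ++ suf

-- A's loop over the flag list (to share reasoning with B's flag list)
def pvALoopB (f : List Bool) (cnt : Int) : Int :=
  match f with
  | [] => if cnt ≥ 4 then 1 else 0
  | a :: rest =>
      if a then pvALoopB rest (cnt + 1)
      else if cnt ≥ 4 then 1 else pvALoopB rest 0

lemma pvALoop_eq_B (ts : List String) (cnt : Int) :
    pvALoop ts cnt = pvALoopB (ts.map (fun x => PySem.Str.strIsdigit x)) cnt := by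
  induction ts generalizing cnt with
  | nil => rfl
  | cons e rest ih => simp [pvALoop, pvALoopB, ih]

lemma pvW_cons (a : Bool) (f : List Bool) :
    pvW (a :: f) ↔ (∃ suf, a :: f = [true, true, true, true] ++ suf) ∨ pvW f := by
  constructor
  · rintro ⟨pre, suf, h⟩
    cases pre with
    | nil => exact Or.inl ⟨suf, by simpa using h⟩
    | cons x pre' =>
        simp only [List.cons_append] at h
        injection h with h1 h2
        exact Or.inr ⟨pre', suf, h2⟩
  · rintro (⟨suf, h⟩ | ⟨pre, suf, h⟩)
    · exact ⟨[], suf, h⟩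
    · exact ⟨a :: pre, suf, by simp [h]⟩

lemma pvW_nil : ¬ pvW [] := by
  rintro ⟨pre, suf, h⟩
  simpa using congrArg List.length h

-- a true-prefix of length ≥ 4 yields a window
lemma pvNpl_W (f : List Bool) (h : 4 ≤ (f.takeWhile id).length) : pvW f := by
  rcases hf : f.takeWhile id with _ | ⟨a, _ | ⟨b, _ | ⟨c, _ | ⟨d, t⟩⟩⟩⟩ <;>
    simp [hf] at h
  have ha := List.mem_takeWhile_imp (p := id) (l := f) (by rw [hf]; simp : a ∈ f.takeWhile id)
  have hb := List.mem_takeWhile_imp (p := id) (l := f) (by rw [hf]; simp : b ∈ f.takeWhile id)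
  have hc := List.mem_takeWhile_imp (p := id) (l := f) (by rw [hf]; simp : c ∈ f.takeWhile id)
  have hd := List.mem_takeWhile_imp (p := id) (l := f) (by rw [hf]; simp : d ∈ f.takeWhile id)
  simp only [id] at ha hb hc hd
  refine ⟨[], t ++ f.dropWhile id, ?_⟩
  conv_lhs => rw [← List.takeWhile_append_dropWhile (p := id) (l := f)]
  simp [hf, ha, hb, hc, hd]

lemma pvALoopB_one (f : List Bool) (cnt : Int) (hc : 0 ≤ cnt) :
    pvALoopB f cnt = 1 ↔ (4 ≤ cnt + (f.takeWhile id).length ∨ pvW f) := by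
  induction f generalizing cnt with
  | nil =>
      simp only [pvALoopB, List.takeWhile_nil, List.length_nil]
      split_ifs with h
      · simpa using Or.inl (by omega)
      · simp only [Nat.cast_zero, add_zero]
        constructor
        · intro h1; omega
        · rintro (h4 | hw)
          · omega
          · exact absurd hw pvW_nil
  | cons a rest ih =>
      cases a with
      | true =>
          simp only [pvALoopB, if_true]
          rw [ih (cnt + 1) (by omega)]
          have htk : ((true :: rest).takeWhile id) = true :: rest.takeWhile id := by
            simp
          rw [pvW_cons, htk]
          simp only [List.length_cons]
          constructor
          · rintro (h4 | hw)
            · left; push_cast; omega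
            · right; right; exact hw
          · rintro (h4 | ⟨suf, hsuf⟩ | hw)
            · left; push_cast at h4 ⊢; omega
            · left
              have hr : rest = true :: true :: true :: suf := by
                simpa using hsuf
              have : rest.takeWhile id = true :: true :: true :: suf.takeWhile id := by
                rw [hr, List.takeWhile_cons, List.takeWhile_cons, List.takeWhile_cons]
                rfl
              rw [this]
              simp only [List.length_cons]
              push_cast; omega
            · right; exact hw
      | false =>
          simp only [pvALoopB, Bool.false_eq_true, if_false]
          have htk : ((false :: rest).takeWhile id) = [] := by simp
          have hwf : pvW (false :: rest) ↔ pvW rest := by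
            rw [pvW_cons]
            constructor
            · rintro (⟨suf, h⟩ | h)
              · simp at h
              · exact h
            · exact Or.inr
          rw [htk, hwf]
          split_ifs with h4
          · simp only [List.length_nil, Nat.cast_zero, add_zero]
            constructor
            · intro _; left; omega
            · intro _; trivial
          · rw [ih 0 le_rfl]
            simp only [List.length_nil, Nat.cast_zero, add_zero, zero_add]
            constructor
            · rintro (hn | hw)
              · right; exact pvNpl_W rest (by exact_mod_cast hn)
              · right; exact hw
            · rintro (hc4 | hw)
              · omega
              · right; exact hw

lemma pvW_short (f : List Bool) (h : f.length < 4) : ¬ pvW f := by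
  rintro ⟨pre, suf, rfl⟩
  simp at h
  omega

lemma pvBLoop_one (f : List Bool) : pvBLoop f = 1 ↔ pvW f := by
  induction f with
  | nil => exact iff_of_false (by decide) pvW_nil
  | cons a f' ih =>
    rcases f' with _ | ⟨b, _ | ⟨c, _ | ⟨d, rest⟩⟩⟩
    · exact iff_of_false (show ¬(0 : Int) = 1 by decide) (pvW_short [a] (by simp))
    · exact iff_of_false (show ¬(0 : Int) = 1 by decide) (pvW_short [a, b] (by simp))
    · exact iff_of_false (show ¬(0 : Int) = 1 by decide) (pvW_short [a, b, c] (by simp))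
    · simp only [pvBLoop]
      by_cases h : (a && b && c && d) = true
      · rw [if_pos h]
        simp only [Bool.and_eq_true] at h
        obtain ⟨⟨⟨ha, hb⟩, hc⟩, hd⟩ := h
        subst ha hb hc hd
        exact iff_of_true rfl ⟨[], rest, rfl⟩
      · rw [if_neg h, ih, pvW_cons a (b :: c :: d :: rest)]
        constructor
        · exact Or.inr
        · rintro (⟨suf, hs⟩ | hw)
          · exfalso
            simp only [List.cons_append, List.cons.injEq] at hs
            obtain ⟨ha, hb, hc, hd, _⟩ := hs
            simp [ha, hb, hc, hd] at h
          · exact hw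

lemma pvALoopB_mem (f : List Bool) (cnt : Int) : pvALoopB f cnt = 0 ∨ pvALoopB f cnt = 1 := by
  induction f generalizing cnt with
  | nil => by_cases h : cnt ≥ 4 <;> simp [pvALoopB, h]
  | cons a rest ih =>
      cases a <;> by_cases h : cnt ≥ 4 <;> simp [pvALoopB, h, ih]

lemma pvBLoop_mem (f : List Bool) : pvBLoop f = 0 ∨ pvBLoop f = 1 := by
  induction f with
  | nil => left; rfl
  | cons a f' ih =>
    rcases f' with _ | ⟨b, _ | ⟨c, _ | ⟨d, rest⟩⟩⟩
    · left; rfl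
    · left; rfl
    · left; rfl
    · simp only [pvBLoop]
      split_ifs
      · right; rfl
      · exact ih

-- ===== VERDICT (by name: the statement is the Claim_ definition above) =====
theorem Check_IPaddress_spec : Claim_equal_Check_IPaddress := by
  intro tokens_words _
  unfold Spec_Check_IPaddress Check_IPaddress Check_IPaddress_alt
  rw [pvALoop_eq_B]
  set f := tokens_words.map (fun x => PySem.Str.strIsdigit x) with hf
  have hA := pvALoopB_one f 0 le_rfl
  have hB := pvBLoop_one f
  have hA01 := pvALoopB_mem f 0
  have hB01 := pvBLoop_mem f
  by_cases hw : pvW f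
  · rw [hA.2 (Or.inr hw), hB.2 hw]
  · have h1 : pvALoopB f 0 ≠ 1 := fun h => by
      rcases hA.1 h with h4 | hw'
      · exact hw (pvNpl_W f (by omega))
      · exact hw hw'
    have h2 : pvBLoop f ≠ 1 := fun h => hw (hB.1 h)
    rcases hA01 with hA0 | hA1
    · rcases hB01 with hB0 | hB1
      · rw [hA0, hB0]
      · exact absurd hB1 h2
    · exact absurd hA1 h1
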